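-- pv_equiv track=rewrite | github.com/Arya-A-Nair/TY | INS/playground/transpositionCipher.py | rowtransform
-- ===== SOURCE A (Python) =====
-- from math import ceil
--
-- def rowtransform(text,key):
--     text=text.replace(" ","")
--
--     keyLen=len(key)
--     textPerRow=ceil(len(text)/keyLen)
--     extra_char=len(text)%textPerRow
--     matrix=[]
--     count=0
--
--     for i in range(0,keyLen):
--         matrix.append(text[count:count+textPerRow])
--         count+=textPerRow
--         if(i==keyLen-1):
--             matrix[i]+="*"*(textPerRow-extra_char)
--
--     return matrix
-- ===== SOURCE B (Python) =====
-- from math import ceil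
--
-- def rowtransform(text, key):
--     text = text.replace(" ", "")
--     textPerRow = ceil(len(text) / len(key))
--     rows = [[] for _ in range(len(key))]
--     for i, ch in enumerate(text):
--         rows[i // textPerRow].append(ch)
--     rows[len(key) - 1].extend("*" * (textPerRow - len(text) % textPerRow))
--     return ["".join(r) for r in rows]
-- ===== Notes on version B (the rewrite author's own statement) =====
-- stated objective: alternative
-- what changed: A slices the text row by row with a running count offset and patches the last row via an in-loop i==keyLen-1 branch; B makes a single pass over the characters, distributing each into bucket i // textPerRow, and appends the star padding to the last bucket once at the end.
import Mathlib
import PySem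

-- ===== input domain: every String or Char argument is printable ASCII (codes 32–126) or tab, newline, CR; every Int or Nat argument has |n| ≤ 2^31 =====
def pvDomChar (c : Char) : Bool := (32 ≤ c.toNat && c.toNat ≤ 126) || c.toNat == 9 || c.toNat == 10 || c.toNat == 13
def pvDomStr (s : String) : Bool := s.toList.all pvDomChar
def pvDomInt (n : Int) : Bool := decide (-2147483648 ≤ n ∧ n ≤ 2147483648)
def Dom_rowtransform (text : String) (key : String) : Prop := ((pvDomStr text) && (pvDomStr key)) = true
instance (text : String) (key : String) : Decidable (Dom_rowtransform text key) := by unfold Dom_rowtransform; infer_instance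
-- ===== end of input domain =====

-- B replaces A's row-slicing loop (running count offset, in-loop last-row branch) by a single
-- pass distributing each character into bucket i // textPerRow, padding patched once at the end
-- (objective: alternative — same linear cost, different traversal).

-- ===== PORT A =====
-- math.ceil(len(text)/keyLen) ported as exact integer ceiling -((-q)//k): exact for the
-- domain's sizes (far below 2^52, where float division cannot cross an integer boundary).
def rowtransform (text : String) (key : String) : List String :=
  let t : List Char := PySem.Chars.replace text.toList " ".toList "".toList
  let keyLen : Int := (key.toList.length : Int)
  let textPerRow : Int := -(PySem.Int.floordiv (-(t.length : Int)) keyLen)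
  let extraChar : Int := PySem.Int.mod (t.length : Int) textPerRow
  let st := (PySem.List.pyRange 0 keyLen 1).foldl
    (fun (s : List (List Char) × Int) i =>
      let m := s.1 ++ [PySem.List.slice t (some s.2) (some (s.2 + textPerRow))]
      let c := s.2 + textPerRow
      let m := if i = keyLen - 1 then
          m.set i.toNat (m.getD i.toNat [] ++ PySem.List.pyRepeat ['*'] (textPerRow - extraChar))
        else m
      (m, c)) ([], 0)
  st.1.map String.ofList

-- ===== PORT B =====
-- rows[j].append(ch) / rows[k-1].extend(…) are ported as set/getD at the (in-range) index.
def rowtransform_alt (text : String) (key : String) : List String :=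
  let t : List Char := PySem.Chars.replace text.toList " ".toList "".toList
  let textPerRow : Int := -(PySem.Int.floordiv (-(t.length : Int)) (key.toList.length : Int))
  let rows : List (List Char) := List.replicate key.toList.length []
  let rows := (PySem.List.enumerate t 0).foldl
    (fun B x => B.set (PySem.Int.floordiv x.1 textPerRow).toNat
      (B.getD (PySem.Int.floordiv x.1 textPerRow).toNat [] ++ [x.2])) rows
  let rows := rows.set (key.toList.length - 1)
    (rows.getD (key.toList.length - 1) [] ++
      PySem.List.pyRepeat ['*'] (textPerRow - PySem.Int.mod (t.length : Int) textPerRow))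
  rows.map String.ofList

-- ===== PRECONDITION & SPEC =====
-- Pre_ excludes exactly the inputs where A raises ZeroDivisionError: an empty key
-- (division by len(key)) and a text that is empty after removing spaces (modulo by 0).
def Pre_rowtransform (text : String) (key : String) : Prop :=
  key.toList ≠ [] ∧ PySem.Chars.replace text.toList " ".toList "".toList ≠ []
instance (text : String) (key : String) : Decidable (Pre_rowtransform text key) := by
  unfold Pre_rowtransform; infer_instance
def pvWitness_rowtransform : String × String := ("common sense", "keys")

def Spec_rowtransform (text : String) (key : String) (out : List String) : Prop := out = rowtransform_alt text key
instance (text : String) (key : String) (out : List String) : Decidable (Spec_rowtransform text key out) := by unfold Spec_rowtransform; infer_instance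

-- ===== CLAIM (what is proved, stated in full; the proofs are below) =====
def Claim_equal_rowtransform : Prop := ∀ (text : String) (key : String), Dom_rowtransform text key → Pre_rowtransform text key → Spec_rowtransform text key (rowtransform text key)

-- ===== LEMMAS AND PROOFS =====

-- A's loop body with the (never-firing) last-row test removed, over an arbitrary list,
-- appends one slice per element and advances the counter by textPerRow each time.
lemma foldA_plain {α : Type} (L : List α) (t : List Char) (tpr : Int)
    (acc : List (List Char)) (c : Int) :
    L.foldl (fun (s : List (List Char) × Int) _ =>
        (s.1 ++ [PySem.List.slice t (some s.2) (some (s.2 + tpr))], s.2 + tpr)) (acc, c)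
    = (acc ++ (List.range L.length).map
        (fun j : Nat => PySem.List.slice t (some (c + (j : Int) * tpr)) (some (c + (j : Int) * tpr + tpr))),
       c + L.length * tpr) := by
  induction L generalizing acc c with
  | nil => simp
  | cons x L ih =>
    simp only [List.foldl_cons, ih, List.length_cons, Prod.mk.injEq]
    refine ⟨?_, by push_cast; ring⟩
    rw [List.range_succ_eq_map]
    simp only [List.map_cons, List.map_map, List.append_assoc, List.cons_append,
      List.nil_append]
    congr 2
    · simp
    · apply List.map_congr_left; intro j _
      simp only [Function.comp_apply]
      congr 2 <;> push_cast <;> ring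

-- setting / reading the last cell of front ++ [x]
lemma set_last_append {α : Type} (front : List α) (x y : α) :
    (front ++ [x]).set front.length y = front ++ [y] := by
  induction front with
  | nil => rfl
  | cons a l ih => simp [ih]

lemma getD_last_append {α : Type} (front : List α) (x d : α) :
    (front ++ [x]).getD front.length d = x := by
  induction front with
  | nil => rfl
  | cons a l ih => simp

lemma getD_set {α : Type} (B : List α) (m j : Nat) (v d : α) (hm : m < B.length) :
    (B.set m v).getD j d = if m = j then v else B.getD j d := by
  simp only [List.getD_eq_getElem?_getD, List.getElem?_set]
  split_ifs with h
  · subst h; simp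
  · rfl

-- the distribution loop keeps the number of buckets
lemma distrib_len (p : Nat) (l : List (Char × Nat)) :
    ∀ (B : List (List Char)),
      (l.foldl (fun B x => B.set (x.2 / p) (B.getD (x.2 / p) [] ++ [x.1])) B).length
        = B.length := by
  induction l with
  | nil => intro B; rfl
  | cons x l ih => intro B; rw [List.foldl_cons, ih, List.length_set]

-- bucket j of the distribution loop collects, in order, the characters whose index
-- floor-divides to j
lemma distrib_getD (p : Nat) (l : List (Char × Nat)) :
    ∀ (B : List (List Char)) (j : Nat), j < B.length →
      (l.foldl (fun B x => B.set (x.2 / p) (B.getD (x.2 / p) [] ++ [x.1])) B).getD j []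
        = B.getD j [] ++ (l.filter (fun x => x.2 / p == j)).map Prod.fst := by
  induction l with
  | nil => intro B j _; simp
  | cons x l ih =>
    intro B j hj
    by_cases hset : x.2 / p < B.length
    · rw [List.foldl_cons, ih _ j (by rw [List.length_set]; exact hj)]
      rw [getD_set _ _ _ _ _ hset]
      by_cases h : x.2 / p = j
      · simp [h]
      · simp [h]
    · -- the set is out of range: a no-op (never reached from the ports under Pre_)
      rw [List.foldl_cons, List.set_eq_of_length_le (by omega), ih _ j hj]
      have h : ¬ x.2 / p = j := by omega
      simp [h]

-- no index of u (shifted by s) falls in bucket j: the filter is empty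
lemma filt_none (p j : Nat) (u : List Char) :
    ∀ (s : Nat), (∀ i, i < u.length → ¬ (s + i) / p = j) →
      ((u.zipIdx s).filter (fun x => x.2 / p == j)) = [] := by
  induction u with
  | nil => intro s _; rfl
  | cons c u ih =>
    intro s h
    rw [List.zipIdx_cons, List.filter_cons]
    have h0 : ¬ s / p = j := by have := h 0 (by simp); simpa using this
    simp only [beq_iff_eq, h0]
    exact ih (s + 1) (fun i hi => by
      have h2 := h (i + 1) (by simpa using Nat.succ_lt_succ hi)
      rwa [show s + (i + 1) = s + 1 + i from by omega] at h2)

-- every index of u (shifted by s) falls in bucket j: the filter keeps everything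
lemma filt_all (p j : Nat) (u : List Char) :
    ∀ (s : Nat), (∀ i, i < u.length → (s + i) / p = j) →
      ((u.zipIdx s).filter (fun x => x.2 / p == j)).map Prod.fst = u := by
  induction u with
  | nil => intro s _; rfl
  | cons c u ih =>
    intro s h
    rw [List.zipIdx_cons, List.filter_cons]
    have h0 : s / p = j := by have := h 0 (by simp); simpa using this
    simp only [beq_iff_eq, h0, if_true, List.map_cons]
    rw [ih (s + 1) (fun i hi => by
      have h2 := h (i + 1) (by simpa using Nat.succ_lt_succ hi)
      rwa [show s + (i + 1) = s + 1 + i from by omega] at h2)]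

-- the characters whose index floor-divides to j are exactly the j-th chunk of the text
lemma filter_chunk (p j : Nat) (hp : 1 ≤ p) (t : List Char) :
    ((t.zipIdx 0).filter (fun x => x.2 / p == j)).map Prod.fst
      = (t.drop (j * p)).take p := by
  obtain ⟨J, hJ⟩ : ∃ J, j * p = J := ⟨_, rfl⟩
  have hsplit : t = t.take J ++ ((t.drop J).take p ++ (t.drop (J + p))) := by
    rw [← List.take_append_drop p (t.drop J), List.drop_drop]
    simp [Nat.add_comm]
  set u1 := t.take J with hu1
  set u2 := (t.drop J).take p with hu2
  set u3 := t.drop (J + p) with hu3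
  have hl1 : u1.length = min J t.length := by simp [hu1]
  have hl2 : u2.length = min p (t.length - J) := by simp [hu2]
  have hl3 : u3.length = t.length - (J + p) := by simp [hu3]
  conv_lhs => rw [hsplit]
  rw [List.zipIdx_append, List.zipIdx_append, List.filter_append, List.filter_append]
  rw [filt_none p j u1 0 (fun i hi => by
    rw [hl1] at hi
    have h1 : 0 + i < j * p := by omega
    have := (Nat.div_lt_iff_lt_mul hp).mpr h1
    omega)]
  rw [filt_none p j u3 (0 + u1.length + u2.length) (fun i hi => by
    rw [hl3] at hi
    have hq : J + p ≤ t.length := by omega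
    have hs : 0 + u1.length + u2.length = J + p := by
      rw [hl1, hl2]; omega
    rw [hs]
    have h1 : (j + 1) * p ≤ J + p + i := by
      rw [Nat.succ_mul, hJ]; omega
    have := (Nat.le_div_iff_mul_le hp).mpr h1
    omega)]
  rw [List.map_append, List.map_append,
    filt_all p j u2 (0 + u1.length) (fun i hi => by
      rw [hl2] at hi
      have hq : J ≤ t.length := by omega
      have hs : 0 + u1.length = J := by rw [hl1]; omega
      rw [hs]
      exact Nat.div_eq_of_lt_le (by omega) (by rw [Nat.succ_mul, hJ]; omega))]
  simpa [hJ] using hu2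

theorem rowtransform_spec : Claim_equal_rowtransform := by
  intro text key _dom pre
  obtain ⟨hkey, ht⟩ := pre
  unfold Spec_rowtransform rowtransform rowtransform_alt
  dsimp only
  set t := PySem.Chars.replace text.toList " ".toList "".toList with htdef
  obtain ⟨k', hk⟩ : ∃ k', key.toList.length = k' + 1 := by
    cases h : key.toList with
    | nil => exact absurd h hkey
    | cons a l => exact ⟨l.length, by simp⟩
  have hq : 0 < (t.length : Int) := by
    have : t ≠ [] := ht
    have := List.length_pos_iff.mpr this
    omega
  have hkpos : (0:Int) < (key.toList.length : Int) := by rw [hk]; push_cast; omega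
  have htpr : 1 ≤ -(PySem.Int.floordiv (-(t.length : Int)) (key.toList.length : Int)) := by
    have h := (PySem.Int.floordiv_lt_iff_lt_mul
      (a := -(t.length : Int)) (q := 0) hkpos).2 (by omega)
    omega
  set tpr := -PySem.Int.floordiv (-(t.length : Int)) (key.toList.length : Int) with htprdef
  set pad := PySem.List.pyRepeat ['*'] (tpr - PySem.Int.mod (t.length : Int) tpr) with hpaddef
  obtain ⟨p, hp, hp1⟩ : ∃ p : Nat, tpr = (p : Int) ∧ 1 ≤ p := ⟨tpr.toNat, by omega, by omega⟩
  congr 1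
  simp only [hk]
  -- ===== A's side: loop = slices of the text, last row patched =====
  rw [PySem.List.pyRange_zero_natCast (k'+1), List.foldl_map, List.range_succ,
    List.foldl_append]
  rw [PySem.List.foldl_congr_mem (List.range k') _
    (fun (s : List (List Char) × Int) (_ : Nat) =>
      (s.1 ++ [PySem.List.slice t (some s.2) (some (s.2 + tpr))], s.2 + tpr)) ([], 0)
    (by intro acc x hx
        simp only [List.mem_range] at hx
        simp only [if_neg (show ¬ ((x : Int) = ((k' + 1 : Nat) : Int) - 1) by omega)])]
  rw [foldA_plain]
  simp only [List.length_range, List.foldl_cons, List.foldl_nil, List.nil_append]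
  rw [if_pos (show ((k' : Nat) : Int) = ((k' + 1 : Nat) : Int) - 1 by omega)]
  have hfl : ((List.range k').map (fun j : Nat =>
      PySem.List.slice t (some (0 + (j : Int) * tpr)) (some (0 + (j : Int) * tpr + tpr)))).length = k' := by
    simp
  rw [show ((k' : Int)).toNat = ((List.range k').map (fun j : Nat =>
      PySem.List.slice t (some (0 + (j : Int) * tpr)) (some (0 + (j : Int) * tpr + tpr)))).length
    by rw [hfl]; omega]
  rw [set_last_append, getD_last_append]
  -- each slice is the drop/take chunk
  have hone : ∀ (c : Int) (a : Nat), c = ((a * p : Nat) : Int) →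
      PySem.List.slice t (some c) (some (c + tpr)) = (t.drop (a * p)).take p := by
    intro c a hc
    rw [hc, hp, show ((a * p : Nat) : Int) + (p : Int) = (((a * p + p : Nat)) : Int) by push_cast; ring,
      PySem.List.slice_natCast]
    congr 1
    omega
  -- ===== B's side: the distribution loop builds exactly those chunks =====
  rw [PySem.List.enumerate_eq_zipIdx_map t 0, List.foldl_map]
  rw [PySem.List.foldl_congr_mem (t.zipIdx 0) _
    (fun (B : List (List Char)) (x : Char × Nat) =>
      B.set (x.2 / p) (B.getD (x.2 / p) [] ++ [x.1])) (List.replicate (k' + 1) [])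
    (by intro B x _
        have : PySem.Int.floordiv (0 + (x.2 : Int)) tpr = ((x.2 / p : Nat) : Int) := by
          rw [hp, show (0 + (x.2 : Int)) = ((x.2 : Nat) : Int) by ring]
          exact PySem.Int.floordiv_natCast x.2 p
        simp only [this, Int.toNat_natCast])]
  -- the fold result, bucket by bucket
  have hBlen : ((t.zipIdx 0).foldl
      (fun (B : List (List Char)) (x : Char × Nat) =>
        B.set (x.2 / p) (B.getD (x.2 / p) [] ++ [x.1])) (List.replicate (k' + 1) [])).length
      = k' + 1 := by
    rw [distrib_len]; simp
  have hBfold : ((t.zipIdx 0).foldl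
      (fun (B : List (List Char)) (x : Char × Nat) =>
        B.set (x.2 / p) (B.getD (x.2 / p) [] ++ [x.1])) (List.replicate (k' + 1) []))
      = (List.range (k' + 1)).map (fun j => (t.drop (j * p)).take p) := by
    apply List.ext_getElem
    · rw [hBlen]; simp
    · intro j hj1 hj2
      have hjk : j < k' + 1 := by have h2 := hj1; rwa [hBlen] at h2
      rw [← List.getD_eq_getElem _ [] hj1, ← List.getD_eq_getElem _ [] hj2]
      rw [distrib_getD p (t.zipIdx 0) (List.replicate (k' + 1) []) j
        (by rw [List.length_replicate]; exact hjk)]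
      rw [filter_chunk p j hp1 t]
      simp [List.getD_eq_getElem?_getD, hjk]
  rw [hBfold]
  rw [List.range_succ, List.map_append, List.map_cons, List.map_nil]
  have hfl2 : ((List.range k').map (fun j => (t.drop (j * p)).take p)).length = k' := by simp
  rw [show k' + 1 - 1 = ((List.range k').map (fun j => (t.drop (j * p)).take p)).length
    by rw [hfl2]; omega]
  rw [set_last_append, getD_last_append]
  -- ===== both sides are the same chunk list =====
  congr 1
  · apply List.map_congr_left
    intro j _
    exact hone (0 + (j : Int) * tpr) j (by rw [hp]; push_cast; ring)
  · rw [hone (0 + (k' : Int) * tpr) k' (by rw [hp]; push_cast; ring)]
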